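-- pv_equiv track=rewrite | github.com/masarwy/SternhalmaEnv | sternhalma/utils/grid.py | generate_triangle_pattern
-- ===== SOURCE A (Python) =====
-- from typing import List, Tuple
--
-- def generate_triangle_pattern(matrix_size: int) -> List[List[str]]:
--     # Initialize the matrix with spaces
--     matrix = [[' ' for _ in range(matrix_size)] for _ in range(matrix_size)]
--
--     # Fill the triangle pattern
--     for r in range(matrix_size):
--         for c in range((r // 2) + 1):
--             if r % 2 == 0:
--                 # For even rows, place 'O' in the correct columns
--                 matrix[r][c * 2] = 'O'
--             else:
--                 # For odd rows, place 'O' or '|' based on the column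
--                 if c * 2 + 1 <= r:
--                     matrix[r][c * 2 + 1] = '|' if c != r // 2 else 'O'
--
--     return matrix
-- ===== SOURCE B (Python) =====
-- def generate_triangle_pattern(matrix_size):
--     # Single pass: compute each cell directly from (r, j) instead of
--     # initializing with spaces and then scattering writes.
--     def cell(r, j):
--         if r % 2 == 0:
--             return 'O' if j % 2 == 0 and j <= r else ' '
--         else:
--             if j % 2 == 1 and j <= r:
--                 return 'O' if j == r else '|'
--             return ' '
--     return [[cell(r, j) for j in range(matrix_size)] for r in range(matrix_size)]
-- ===== Notes on version B (the rewrite author's own statement) =====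
-- stated objective: simpler
-- what changed: Replaced the two-pass build (all-space init plus a sparse scatter of writes indexed by c) with a single pass that computes every cell directly from (r, j) via a per-cell rule.
import Mathlib
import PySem

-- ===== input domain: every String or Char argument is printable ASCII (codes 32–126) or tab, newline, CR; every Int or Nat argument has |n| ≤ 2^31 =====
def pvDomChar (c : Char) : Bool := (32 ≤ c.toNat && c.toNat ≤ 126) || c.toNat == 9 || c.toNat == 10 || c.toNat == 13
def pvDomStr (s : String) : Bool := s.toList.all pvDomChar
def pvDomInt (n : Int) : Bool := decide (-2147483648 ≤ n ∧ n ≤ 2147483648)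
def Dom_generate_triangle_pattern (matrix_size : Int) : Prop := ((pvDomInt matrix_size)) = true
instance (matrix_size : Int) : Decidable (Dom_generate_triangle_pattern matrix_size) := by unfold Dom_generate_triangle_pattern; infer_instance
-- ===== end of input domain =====

-- B replaces A's two passes (all-space init + sparse scatter of writes) with one pass computing each cell directly from (r, j); objective: simpler.

-- ===== PORT A =====
def generate_triangle_pattern (matrix_size : Int) : List (List String) :=
  -- matrix = [[' ' for _ in range(matrix_size)] for _ in range(matrix_size)]
  let matrix : List (List String) :=
    (PySem.List.pyRange 0 matrix_size 1).map
      (fun _ => (PySem.List.pyRange 0 matrix_size 1).map (fun _ => " "))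
  -- for r in range(matrix_size): for c in range((r // 2) + 1): …
  (PySem.List.pyRange 0 matrix_size 1).foldl (fun m r =>
    (PySem.List.pyRange 0 (PySem.Int.floordiv r 2 + 1) 1).foldl (fun m c =>
      if PySem.Int.mod r 2 == 0 then
        -- matrix[r][c * 2] = 'O'   (indices here are always nonnegative and in range)
        PySem.List.pySetD m r (PySem.List.pySetD (PySem.List.pyGetD m r []) (c * 2) "O")
      else
        if c * 2 + 1 ≤ r then
          -- matrix[r][c * 2 + 1] = '|' if c != r // 2 else 'O'
          PySem.List.pySetD m r (PySem.List.pySetD (PySem.List.pyGetD m r []) (c * 2 + 1)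
            (if c ≠ PySem.Int.floordiv r 2 then "|" else "O"))
        else m) m) matrix

-- ===== PORT B =====
-- def cell(r, j)
def pvCell (r j : Int) : String :=
  if PySem.Int.mod r 2 == 0 then
    if PySem.Int.mod j 2 == 0 && decide (j ≤ r) then "O" else " "
  else
    if PySem.Int.mod j 2 == 1 && decide (j ≤ r) then (if j == r then "O" else "|")
    else " "

def generate_triangle_pattern_alt (matrix_size : Int) : List (List String) :=
  (PySem.List.pyRange 0 matrix_size 1).map (fun r =>
    (PySem.List.pyRange 0 matrix_size 1).map (fun j => pvCell r j))

-- ===== PRECONDITION & SPEC =====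
def Spec_generate_triangle_pattern (matrix_size : Int) (out : List (List String)) : Prop := out = generate_triangle_pattern_alt matrix_size
instance (matrix_size : Int) (out : List (List String)) : Decidable (Spec_generate_triangle_pattern matrix_size out) := by unfold Spec_generate_triangle_pattern; infer_instance

-- ===== CLAIM (what is proved, stated in full; the proofs are below) =====
def Claim_equal_generate_triangle_pattern : Prop := ∀ (matrix_size : Int), Dom_generate_triangle_pattern matrix_size → Spec_generate_triangle_pattern matrix_size (generate_triangle_pattern matrix_size)

-- ===== LEMMAS AND PROOFS =====

-- the all-space row and matrix of A's first pass
def pvSRow (n : Int) : List String := (PySem.List.pyRange 0 n 1).map (fun _ => " ")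

-- row-level body of A's inner loop (after lifting the matrix writes to the row)
def pvGRow (r : Int) (row : List String) (c : Int) : List String :=
  if PySem.Int.mod r 2 == 0 then
    PySem.List.pySetD row (c * 2) "O"
  else
    if c * 2 + 1 ≤ r then
      PySem.List.pySetD row (c * 2 + 1) (if c ≠ PySem.Int.floordiv r 2 then "|" else "O")
    else row

-- what A's inner loop makes of row r
def pvFinalRow (n r : Int) : List String :=
  (PySem.List.pyRange 0 (PySem.Int.floordiv r 2 + 1) 1).foldl (pvGRow r) (pvSRow n)

-- setting a row to itself is a no-op (also when out of range)
lemma pvSetD_getD_self (m : List (List String)) (r : Int) (h0 : 0 ≤ r) :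
    PySem.List.pySetD m r (PySem.List.pyGetD m r []) = m := by
  rw [PySem.List.pySetD_of_nonneg _ _ h0, PySem.List.pyGetD_of_nonneg _ _ h0]
  by_cases h : r.toNat < m.length
  · rw [List.getD_eq_getElem _ _ h, List.set_getElem_self]
  · rw [List.set_eq_of_length_le (by omega)]

-- a fold that only writes (through pySetD at row r) lifts to a fold on row r
lemma pvLift (g : List String → Int → List String) (cs : List Int)
    (m : List (List String)) (r : Int) (h0 : 0 ≤ r) (h1 : r < (m.length : Int)) :
    cs.foldl (fun m c => PySem.List.pySetD m r (g (PySem.List.pyGetD m r []) c)) m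
      = PySem.List.pySetD m r (cs.foldl g (PySem.List.pyGetD m r [])) := by
  induction cs generalizing m with
  | nil => simp [pvSetD_getD_self m r h0]
  | cons x cs ih =>
    simp only [List.foldl_cons]
    rw [ih _ (by rw [PySem.List.length_pySetD]; exact h1)]
    have hlt : r.toNat < m.length := by omega
    have hcast : (r.toNat : Int) = r := by omega
    rw [← hcast, PySem.List.pyGetD_pySetD_natCast _ _ _ _ _ hlt, if_pos rfl]
    simp only [PySem.List.pySetD_of_nonneg _ _ (Int.natCast_nonneg _), Int.toNat_natCast,
      List.set_set]

-- a fold of in-range writes preserves length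
lemma pvFoldLen (g : List String → Int → List String)
    (hg : ∀ row c, (g row c).length = row.length) (cs : List Int) (row : List String) :
    (cs.foldl g row).length = row.length := by
  induction cs generalizing row with
  | nil => rfl
  | cons x cs ih => simp only [List.foldl_cons]; rw [ih, hg]

-- pointwise value of a fold of writes whose written value is a function of the index
lemma pvFoldGet (idx : Int → Int) (val : Int → String) (valAt : Int → String)
    (cs : List Int) (row : List String) (j : Int) (hj : 0 ≤ j)
    (hIdx : ∀ c ∈ cs, 0 ≤ idx c ∧ idx c < (row.length : Int))
    (hval : ∀ c ∈ cs, val c = valAt (idx c)) :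
    PySem.List.pyGetD (cs.foldl (fun row c => PySem.List.pySetD row (idx c) (val c)) row) j " "
      = if j ∈ cs.map idx then valAt j else PySem.List.pyGetD row j " " := by
  induction cs generalizing row with
  | nil => simp
  | cons x cs ih =>
    simp only [List.foldl_cons, List.map_cons, List.mem_cons]
    rw [ih _ (fun c hc => by rw [PySem.List.length_pySetD]; exact hIdx c (List.mem_cons_of_mem _ hc))
          (fun c hc => hval c (List.mem_cons_of_mem _ hc))]
    obtain ⟨hx0, hx1⟩ := hIdx x (List.mem_cons_self ..)
    by_cases hmem : j ∈ cs.map idx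
    · simp [hmem]
    · simp only [hmem, if_false, or_false]
      rw [PySem.List.pySetD_of_nonneg _ _ hx0, PySem.List.pyGetD_of_nonneg _ _ hj,
        PySem.List.pyGetD_of_nonneg _ _ hj, List.getD_eq_getElem?_getD,
        List.getD_eq_getElem?_getD, List.getElem?_set]
      by_cases hjx : j = idx x
      · rw [if_pos (by omega), if_pos (by omega), if_pos (by omega),
          hval x (List.mem_cons_self ..), hjx, Option.getD_some]
      · rw [if_neg (by omega), if_neg hjx]

-- A's processed row r equals B's directly computed row
lemma pvRowEq (n r : Int) (h0 : 0 ≤ r) (h1 : r < n) :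
    pvFinalRow n r = (PySem.List.pyRange 0 n 1).map (fun j => pvCell r j) := by
  have hr2 : PySem.Int.mod r 2 = r % 2 := PySem.Int.mod_eq_emod_of_pos (by norm_num)
  have hfd : PySem.Int.floordiv r 2 = r / 2 := PySem.Int.floordiv_eq_ediv_of_pos (by norm_num)
  have hsl : ((pvSRow n).length : Int) = n := by
    simp [pvSRow, PySem.List.length_pyRange_one]; omega
  have key : ∀ j : Int, 0 ≤ j → j < n →
      PySem.List.pyGetD (pvFinalRow n r) j " " = pvCell r j := by
    intro j hj0 hjn
    have hj2 : PySem.Int.mod j 2 = j % 2 := PySem.Int.mod_eq_emod_of_pos (by norm_num)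
    have hsj : PySem.List.pyGetD (pvSRow n) j " " = " " :=
      PySem.List.pyGetD_map_pyRange_of_nonneg _ _ _ _ hj0 hjn
    rcases Int.emod_two_eq_zero_or_one r with he | he
    · -- even row
      have hbody : ∀ (row : List String), ∀ c ∈ PySem.List.pyRange 0 (PySem.Int.floordiv r 2 + 1) 1,
          pvGRow r row c = PySem.List.pySetD row (c * 2) "O" := by
        intro row c _
        unfold pvGRow
        rw [hr2, he]
        simp
      unfold pvFinalRow
      rw [PySem.List.foldl_congr_mem _ _ _ _ hbody,
        pvFoldGet (fun c => c * 2) (fun _ => "O") (fun _ => "O") _ _ _ hj0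
          (fun c hc => by
            have hcm := PySem.List.mem_pyRange_one.mp hc
            rw [hfd] at hcm
            show 0 ≤ c * 2 ∧ c * 2 < ((pvSRow n).length : Int)
            rw [hsl]
            omega)
          (fun c _ => rfl), hsj]
      have hmem : j ∈ (PySem.List.pyRange 0 (PySem.Int.floordiv r 2 + 1) 1).map (fun c => c * 2)
          ↔ (j % 2 = 0 ∧ j ≤ r) := by
        simp only [List.mem_map, PySem.List.mem_pyRange_one, hfd]
        constructor
        · rintro ⟨c, ⟨hc1, hc2⟩, rfl⟩; omega
        · rintro ⟨h1, h2⟩; exact ⟨j / 2, ⟨by omega, by omega⟩, by omega⟩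
      unfold pvCell
      rw [hr2, he, hj2]
      by_cases hc : j % 2 = 0 ∧ j ≤ r
      · rw [if_pos (hmem.mpr hc)]
        simp [hc.1, hc.2]
      · rw [if_neg (fun h => hc (hmem.mp h))]
        rcases Decidable.not_and_iff_not_or_not.mp hc with h | h <;> simp <;> omega
    · -- odd row
      have hbody : ∀ (row : List String), ∀ c ∈ PySem.List.pyRange 0 (PySem.Int.floordiv r 2 + 1) 1,
          pvGRow r row c
            = PySem.List.pySetD row (c * 2 + 1) (if c ≠ PySem.Int.floordiv r 2 then "|" else "O") := by
        intro row c hc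
        have hcr := PySem.List.mem_pyRange_one.mp hc
        rw [hfd] at hcr
        unfold pvGRow
        rw [hr2, he, if_neg (by simp), if_pos (by omega)]
      unfold pvFinalRow
      rw [PySem.List.foldl_congr_mem _ _ _ _ hbody,
        pvFoldGet (fun c => c * 2 + 1) (fun c => if c ≠ PySem.Int.floordiv r 2 then "|" else "O")
          (fun j => if j == r then "O" else "|") _ _ _ hj0
          (fun c hc => by
            have hcm := PySem.List.mem_pyRange_one.mp hc
            rw [hfd] at hcm
            show 0 ≤ c * 2 + 1 ∧ c * 2 + 1 < ((pvSRow n).length : Int)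
            rw [hsl]
            omega)
          (fun c hc => by
            have hcr := PySem.List.mem_pyRange_one.mp hc
            rw [hfd] at hcr
            show (if c ≠ PySem.Int.floordiv r 2 then "|" else "O")
              = (if ((c * 2 + 1 : Int) == r) = true then "O" else "|")
            rw [hfd]
            by_cases hceq : c = r / 2
            · rw [if_neg (by simp [hceq]), if_pos (by simp only [beq_iff_eq]; omega)]
            · rw [if_pos hceq, if_neg (by simp only [beq_iff_eq]; omega)]), hsj]
      have hmem : j ∈ (PySem.List.pyRange 0 (PySem.Int.floordiv r 2 + 1) 1).map (fun c => c * 2 + 1)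
          ↔ (j % 2 = 1 ∧ j ≤ r) := by
        simp only [List.mem_map, PySem.List.mem_pyRange_one, hfd]
        constructor
        · rintro ⟨c, ⟨hc1, hc2⟩, rfl⟩; omega
        · rintro ⟨h1, h2⟩; exact ⟨j / 2, ⟨by omega, by omega⟩, by omega⟩
      unfold pvCell
      rw [hr2, he, hj2]
      by_cases hc : j % 2 = 1 ∧ j ≤ r
      · rw [if_pos (hmem.mpr hc)]
        simp [hc.1, hc.2]
      · rw [if_neg (fun h => hc (hmem.mp h))]
        rcases Decidable.not_and_iff_not_or_not.mp hc with h | h <;> simp <;> omega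
  have hglen : ∀ (row : List String) (c : Int), (pvGRow r row c).length = row.length := by
    intro row c
    unfold pvGRow
    split_ifs <;> simp [PySem.List.length_pySetD]
  have hlen : (pvFinalRow n r).length = n.toNat := by
    unfold pvFinalRow
    rw [pvFoldLen _ hglen]
    omega
  apply List.ext_getElem
  · simp [hlen, PySem.List.length_pyRange_one]
  · intro k hk1 hk2
    have hkn : (k : Int) < n := by
      rw [hlen] at hk1; omega
    have := key (k : Int) (by positivity) hkn
    rw [PySem.List.pyGetD_eq_getElem _ _ (by positivity) (by rw [hlen]; omega)] at this
    simp only [Int.toNat_natCast] at this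
    rw [this, List.getElem_map, PySem.List.getElem_pyRange_one]
    norm_num

-- the outer loop, stopped after the first b rows
lemma pvOuter (n : Int) (b : Nat) (hb : (b : Int) ≤ n) :
    (PySem.List.pyRange 0 (b : Int) 1).foldl (fun m r =>
      (PySem.List.pyRange 0 (PySem.Int.floordiv r 2 + 1) 1).foldl (fun m c =>
        if PySem.Int.mod r 2 == 0 then
          PySem.List.pySetD m r (PySem.List.pySetD (PySem.List.pyGetD m r []) (c * 2) "O")
        else
          if c * 2 + 1 ≤ r then
            PySem.List.pySetD m r (PySem.List.pySetD (PySem.List.pyGetD m r []) (c * 2 + 1)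
              (if c ≠ PySem.Int.floordiv r 2 then "|" else "O"))
          else m) m)
      ((PySem.List.pyRange 0 n 1).map (fun _ => pvSRow n))
    = (PySem.List.pyRange 0 n 1).map (fun r => if r < (b : Int) then pvFinalRow n r else pvSRow n) := by
  induction b with
  | zero =>
    rw [show ((0 : Nat) : Int) = 0 from rfl, PySem.List.pyRange_one_eq_nil (le_refl 0)]
    exact List.map_congr_left (fun r hr => by
      rw [if_neg (by have := PySem.List.mem_pyRange_one.mp hr; omega)])
  | succ b ih =>
    have hb' : (b : Int) ≤ n := by push_cast at hb ⊢; omega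
    rw [show ((b + 1 : Nat) : Int) = (b : Int) + 1 by push_cast; ring,
      PySem.List.pyRange_one_succ_right (by positivity), List.foldl_append, ih hb']
    have hMlen : ((PySem.List.pyRange 0 n 1).map
        (fun r => if r < (b : Int) then pvFinalRow n r else pvSRow n)).length = n.toNat := by
      simp [PySem.List.length_pyRange_one]
    simp only [List.foldl_cons, List.foldl_nil]
    rw [PySem.List.foldl_congr_mem _ _
      (fun m c => PySem.List.pySetD m (b : Int) (pvGRow (b : Int) (PySem.List.pyGetD m (b : Int) []) c)) _
      (fun acc c _ => by
        simp only [pvGRow]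
        split_ifs <;>
          first
            | rfl
            | exact (pvSetD_getD_self acc _ (by positivity)).symm),
      pvLift _ _ _ _ (by positivity) (by rw [hMlen]; omega),
      PySem.List.pyGetD_map_pyRange_of_nonneg _ _ _ _ (by positivity) (by omega),
      if_neg (lt_irrefl _)]
    rw [PySem.List.pySetD_of_nonneg _ _ (by positivity), Int.toNat_natCast]
    apply List.ext_getElem
    · simp [PySem.List.length_pyRange_one]
    · intro k hk1 hk2
      rw [List.length_set, hMlen] at hk1
      rw [List.getElem_set, List.getElem_map, PySem.List.getElem_pyRange_one]
      by_cases hkb : b = k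
      · subst hkb
        rw [if_pos rfl, List.getElem_map, PySem.List.getElem_pyRange_one,
          if_pos (by omega)]
        norm_num [pvFinalRow]
      · rw [if_neg hkb, List.getElem_map, PySem.List.getElem_pyRange_one]
        by_cases hkb' : (k : Int) < (b : Int)
        · rw [if_pos (by omega), if_pos (by omega)]
        · rw [if_neg (by omega), if_neg (by omega)]

-- ===== VERDICT (by name: the statement is the Claim_ definition above) =====
theorem generate_triangle_pattern_spec : Claim_equal_generate_triangle_pattern := by
  intro n _
  unfold Spec_generate_triangle_pattern generate_triangle_pattern generate_triangle_pattern_alt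
  by_cases hn : n ≤ 0
  · rw [PySem.List.pyRange_one_eq_nil hn]
    rfl
  · rw [show n = ((n.toNat : Nat) : Int) from by omega]
    rw [show ((PySem.List.pyRange 0 ((n.toNat : Nat) : Int) 1).map
          (fun _ => (PySem.List.pyRange 0 ((n.toNat : Nat) : Int) 1).map (fun _ => (" " : String))))
        = ((PySem.List.pyRange 0 ((n.toNat : Nat) : Int) 1).map
          (fun _ => pvSRow ((n.toNat : Nat) : Int))) from rfl,
      pvOuter _ _ (le_refl _)]
    apply List.map_congr_left
    intro r hr
    have hrm := PySem.List.mem_pyRange_one.mp hr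
    rw [if_pos (by omega), pvRowEq _ _ (by omega) (by omega)]
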